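-- pv_equiv track=rewrite | github.com/maxippacheco/aed2024 | tpl_1/tpl_11.py | discrete_moving_mean
-- ===== SOURCE A (Python) =====
-- def discrete_moving_mean(L: list, w: int):
-- 	result = []
-- 	sum_window = sum(L[:w])
--
-- 	result.append(sum_window // w)
--
-- 	for i in range(w, len(L)):
-- 		sum_window += L[i] - L[i - w]
-- 		result.append(sum_window // w)
-- 	return result
-- ===== SOURCE B (Python) =====
-- def discrete_moving_mean(L: list, w: int):
--     return [sum(L[i:i+w]) // w for i in range(max(1, len(L) - w + 1))]
-- ===== Notes on version B (the rewrite author's own statement) =====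
-- stated objective: simpler
-- what changed: Replaces the incremental running-sum loop (add entering, subtract leaving element) with a one-line comprehension that recomputes each window sum from a slice; window count max(1, len(L)-w+1) covers the single whole-list window when w > len(L).
import Mathlib
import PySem

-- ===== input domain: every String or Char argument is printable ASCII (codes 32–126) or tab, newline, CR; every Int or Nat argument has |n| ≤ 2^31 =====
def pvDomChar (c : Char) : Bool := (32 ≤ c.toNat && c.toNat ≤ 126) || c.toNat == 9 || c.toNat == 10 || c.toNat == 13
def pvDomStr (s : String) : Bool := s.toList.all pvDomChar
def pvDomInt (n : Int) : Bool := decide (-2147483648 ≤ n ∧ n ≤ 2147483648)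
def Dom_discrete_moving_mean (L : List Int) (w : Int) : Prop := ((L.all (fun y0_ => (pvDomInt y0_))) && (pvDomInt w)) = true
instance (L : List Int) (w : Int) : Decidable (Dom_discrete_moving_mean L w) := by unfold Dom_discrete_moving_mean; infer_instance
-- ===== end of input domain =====

-- B replaces A's incremental running-sum loop with a direct per-window slice-sum comprehension (simpler; not faster).


-- ===== PORT A =====
def discrete_moving_mean (L : List Int) (w : Int) : List Int :=
  let sum_window := (PySem.List.slice L none (some w)).sum
  let result := [PySem.Int.floordiv sum_window w]
  ((PySem.List.pyRange w (L.length : Int) 1).foldl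
    (fun (st : List Int × Int) i =>
      let s := st.2 + PySem.List.pyGetD L i 0 - PySem.List.pyGetD L (i - w) 0
      (st.1 ++ [PySem.Int.floordiv s w], s))
    (result, sum_window)).1

-- ===== PORT B =====
def discrete_moving_mean_alt (L : List Int) (w : Int) : List Int :=
  (PySem.List.pyRange 0 (max 1 ((L.length : Int) - w + 1)) 1).map
    (fun i => PySem.Int.floordiv (PySem.List.slice L (some i) (some (i + w))).sum w)

-- ===== PRECONDITION & SPEC =====
-- Pre_ excludes exactly w ≤ 0, where A always raises: w = 0 is a ZeroDivisionError in
-- '// w', and any w < 0 makes A's loop hit an out-of-range index L[i] or L[i-w] (IndexError).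
def Pre_discrete_moving_mean (L : List Int) (w : Int) : Prop := 1 ≤ w
instance (L : List Int) (w : Int) : Decidable (Pre_discrete_moving_mean L w) := by unfold Pre_discrete_moving_mean; infer_instance
def pvWitness_discrete_moving_mean : List Int × Int := ([3, 1, 4, 1, 5], 2)

def Spec_discrete_moving_mean (L : List Int) (w : Int) (out : List Int) : Prop := out = discrete_moving_mean_alt L w
instance (L : List Int) (w : Int) (out : List Int) : Decidable (Spec_discrete_moving_mean L w out) := by unfold Spec_discrete_moving_mean; infer_instance

-- ===== CLAIM (what is proved, stated in full; the proofs are below) =====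
def Claim_equal_discrete_moving_mean : Prop := ∀ (L : List Int) (w : Int), Dom_discrete_moving_mean L w → Pre_discrete_moving_mean L w → Spec_discrete_moving_mean L w (discrete_moving_mean L w)

-- ===== LEMMAS AND PROOFS =====

-- sum of the window of width wn starting at position j
def pvWinSum (L : List Int) (wn j : Nat) : Int := ((L.drop j).take wn).sum

-- sliding one step right adds the entering element and removes the leaving one
theorem pvWinSum_succ (L : List Int) (wn j : Nat) (hw : 1 ≤ wn) (hj : j + wn < L.length) :
    pvWinSum L wn (j + 1) = pvWinSum L wn j + L[j + wn] - L[j] := by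
  obtain ⟨k, rfl⟩ : ∃ k, wn = k + 1 := ⟨wn - 1, by omega⟩
  have hjlt : j < L.length := by omega
  have hdrop : L.drop j = L[j] :: L.drop (j + 1) := List.drop_eq_getElem_cons hjlt
  have h1 : pvWinSum L (k + 1) j = L[j] + ((L.drop (j + 1)).take k).sum := by
    unfold pvWinSum
    rw [hdrop, List.take_succ_cons, List.sum_cons]
  have h2 : pvWinSum L (k + 1) (j + 1)
      = ((L.drop (j + 1)).take k).sum + L[j + (k + 1)] := by
    have hidx : (L.drop (j + 1))[k]? = some L[j + (k + 1)] := by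
      rw [List.getElem?_drop]
      rw [List.getElem?_eq_getElem (by omega)]
      congr 1
      congr 1
      omega
    simp [pvWinSum, List.take_add_one, hidx]
  rw [h1, h2]; ring

-- invariant of A's foldl: having consumed range(w, m), the result list holds the first
-- m - w + 1 window means and the accumulator holds the window sum starting at m - w
theorem pvLoop (L : List Int) (w : Int) (hw : 1 ≤ w) (m : Nat) (hm : w.toNat ≤ m) (hmn : m ≤ L.length) :
    (PySem.List.pyRange w (m : Int) 1).foldl
      (fun (st : List Int × Int) i =>
        let s := st.2 + PySem.List.pyGetD L i 0 - PySem.List.pyGetD L (i - w) 0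
        (st.1 ++ [PySem.Int.floordiv s w], s))
      ([PySem.Int.floordiv (pvWinSum L w.toNat 0) w], pvWinSum L w.toNat 0)
    = ((List.range (m - w.toNat + 1)).map (fun j => PySem.Int.floordiv (pvWinSum L w.toNat j) w),
       pvWinSum L w.toNat (m - w.toNat)) := by
  have hwc : ((w.toNat : Nat) : Int) = w := Int.toNat_of_nonneg (by omega)
  induction m, hm using Nat.le_induction with
  | base =>
    rw [hwc]
    have : PySem.List.pyRange w w 1 = [] := by
      rw [PySem.List.pyRange_one]; simp
    rw [this]
    simp
  | succ m hm ih =>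
    have hmlt : m < L.length := by omega
    have hle : w ≤ (m : Int) := by omega
    have hsplit : PySem.List.pyRange w ((m + 1 : Nat) : Int) 1
        = PySem.List.pyRange w (m : Int) 1 ++ [(m : Int)] := by
      push_cast
      exact PySem.List.pyRange_one_succ_right hle
    rw [hsplit, List.foldl_append, ih (by omega)]
    have hget1 : PySem.List.pyGetD L (m : Int) 0 = L[m] := by
      rw [PySem.List.pyGetD_natCast, List.getD_eq_getElem _ _ hmlt]
    have hcast2 : ((m : Int) - w) = ((m - w.toNat : Nat) : Int) := by omega
    have hget2 : PySem.List.pyGetD L ((m : Int) - w) 0 = L[m - w.toNat]'(by omega) := by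
      rw [hcast2, PySem.List.pyGetD_natCast, List.getD_eq_getElem _ _ (by omega)]
    have hslide : pvWinSum L w.toNat (m - w.toNat) + L[m] - L[m - w.toNat]'(by omega)
        = pvWinSum L w.toNat (m - w.toNat + 1) := by
      have := pvWinSum_succ L w.toNat (m - w.toNat) (by omega) (by omega)
      have hidx : m - w.toNat + w.toNat = m := by omega
      simp only [hidx] at this
      rw [this]
    simp only [List.foldl_cons, List.foldl_nil, hget1, hget2]
    rw [hslide]
    have hm1 : m + 1 - w.toNat = (m - w.toNat + 1) := by omega
    rw [hm1]
    simp [List.range_succ]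

theorem dmm_eq (L : List Int) (w : Int) (hw : 1 ≤ w) :
    discrete_moving_mean L w = discrete_moving_mean_alt L w := by
  have hwc : ((w.toNat : Nat) : Int) = w := Int.toNat_of_nonneg (by omega)
  have hinit : (PySem.List.slice L none (some w)).sum = pvWinSum L w.toNat 0 := by
    rw [← hwc, PySem.List.slice_to_natCast]
    have hmx : (max w 0).toNat = w.toNat := by omega
    simp [pvWinSum, hmx]
  have hB : discrete_moving_mean_alt L w
      = (List.range (L.length - w.toNat + 1)).map (fun j => PySem.Int.floordiv (pvWinSum L w.toNat j) w) := by
    unfold discrete_moving_mean_alt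
    have hmax : max 1 ((L.length : Int) - w + 1) = ((L.length - w.toNat + 1 : Nat) : Int) := by omega
    rw [hmax, PySem.List.pyRange_zero_natCast, List.map_map]
    apply List.map_congr_left
    intro j hj
    have hc : ((j : Int) + w) = ((j + w.toNat : Nat) : Int) := by omega
    simp only [Function.comp]
    rw [hc, PySem.List.slice_natCast]
    have hd : j + w.toNat - j = w.toNat := by omega
    rw [hd]
    rfl
  unfold discrete_moving_mean
  simp only [hinit]
  by_cases hcase : w.toNat ≤ L.length
  · rw [pvLoop L w hw L.length hcase le_rfl, hB]
  · have hempty : PySem.List.pyRange w (L.length : Int) 1 = [] := by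
      rw [PySem.List.pyRange_one]
      have : ((L.length : Int) - w).toNat = 0 := by omega
      rw [this]; simp
    rw [hempty, hB]
    have h1 : L.length - w.toNat + 1 = 1 := by omega
    rw [h1]
    simp

-- ===== VERDICT (by name: the statement is the Claim_ definition above) =====
theorem discrete_moving_mean_spec : Claim_equal_discrete_moving_mean := by
  intro L w _hDom hPre
  unfold Spec_discrete_moving_mean
  exact dmm_eq L w hPre
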